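-- pv_equiv track=rewrite | github.com/syurskyi/Algorithms_and_Data_Structure | _algorithms_challenges/projecteuler/ProjectEuler-master(2)/ProjectEuler-master/342.py | __init_factorization
-- ===== SOURCE A (Python) =====
-- def __init_factorization(bound):
--     result = [{} for _ in range(bound + 1)]
--     visited = [False for _ in range(bound + 1)]
--     for i in range(2, bound + 1):
--         if visited[i]:
--             continue
--         for j in range(i, bound + 1, i):
--             visited[j] = True
--             result[j][i] = 1
--         d = i**2
--         while d <= bound:
--             for j in range(d, bound + 1, d):
--                 result[j][i] += 1
--             d *= i
--     return result
-- ===== SOURCE B (Python) =====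
-- def __init_factorization(bound):
--     # Smallest-prime-factor sieve, then factor each number independently by
--     # repeated division by spf[x] (no visited array, no prime-power passes).
--     n = bound + 1
--     spf = [0] * n
--     for i in range(2, n):
--         if spf[i] == 0:
--             for j in range(i, n, i):
--                 if spf[j] == 0:
--                     spf[j] = i
--     result = [{} for _ in range(n)]
--     for m in range(2, n):
--         x = m
--         f = result[m]
--         while x > 1:
--             p = spf[x]
--             c = 0
--             while x % p == 0:
--                 x //= p
--                 c += 1
--             f[p] = c
--     return result
-- ===== Notes on version B (the rewrite author's own statement) =====
-- stated objective: alternative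
-- what changed: Replaces A's marking of every multiple of each prime and of each prime power across the whole table (with a visited array) by a smallest-prime-factor sieve followed by an independent per-number factorization that repeatedly divides by spf[x].
import Mathlib
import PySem

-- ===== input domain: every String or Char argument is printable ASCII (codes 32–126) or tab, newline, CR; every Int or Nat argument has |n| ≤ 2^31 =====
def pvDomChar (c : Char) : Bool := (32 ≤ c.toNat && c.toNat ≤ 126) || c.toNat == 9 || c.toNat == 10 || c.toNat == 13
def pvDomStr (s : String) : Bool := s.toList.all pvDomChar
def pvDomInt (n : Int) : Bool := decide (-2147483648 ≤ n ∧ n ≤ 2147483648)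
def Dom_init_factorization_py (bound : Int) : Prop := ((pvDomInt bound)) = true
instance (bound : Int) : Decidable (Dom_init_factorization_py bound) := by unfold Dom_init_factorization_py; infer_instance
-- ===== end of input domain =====

-- B replaces A's shared-state sieve by an independent per-number trial-division factorization (alternative decomposition, not claimed faster).

-- ===== PORT A =====
-- `while d <= bound: for j in range(d, bound+1, d): result[j][i] += 1; d *= i`.
-- The fuel (bound+1).toNat is an upper bound on the number of passes (d at least doubles each
-- pass since i ≥ 2); sufficiency is proved in the lemmas below, so this is a totality guard only.
-- `dic.modify i 0 (· + 1)` is Python's `result[j][i] += 1`: the key i is always present here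
-- (set to 1 by the first inner loop), so the default 0 is never consulted.
def powLoopA (bound i : Int) : Nat → Int → List (PySem.Dict Int Int) → List (PySem.Dict Int Int)
  | 0, _, res => res
  | fuel+1, d, res =>
    if d ≤ bound then
      powLoopA bound i fuel (d * i)
        ((PySem.List.pyRange d (bound+1) d).foldl
          (fun r j => r.modify j.toNat (fun dic => dic.modify i 0 (· + 1))) res)
    else res

-- one iteration of A's outer loop (`for i in range(2, bound+1)`); list indices i, j are
-- pyRange values, hence nonnegative and in range, so `.toNat` with getD/modify/set is exact
def stepA (bound : Int) (st : List (PySem.Dict Int Int) × List Bool) (i : Int) :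
    List (PySem.Dict Int Int) × List Bool :=
  if st.2.getD i.toNat false then st
  else
    let st1 := (PySem.List.pyRange i (bound+1) i).foldl
      (fun acc j => (acc.1.modify j.toNat (fun dic => dic.insert i 1), acc.2.set j.toNat true)) st
    (powLoopA bound i (bound+1).toNat (i^2) st1.1, st1.2)

def init_factorization_py (bound : Int) : List (List (Int × Int)) :=
  let result := (PySem.List.pyRange 0 (bound+1) 1).map (fun _ => (PySem.Dict.empty : PySem.Dict Int Int))
  let visited := (PySem.List.pyRange 0 (bound+1) 1).map (fun _ => false)
  let st := (PySem.List.pyRange 2 (bound+1) 1).foldl (stepA bound) (result, visited)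
  st.1.map PySem.Dict.items

-- ===== PORT B =====
-- inner `while x % p == 0: x //= p; c += 1`; returns (c, final x).  The fuel x.toNat passed at
-- the call site bounds the iteration count (each pass divides x by p ≥ 2); proved sufficient below.
def countDivB : Nat → Int → Int → Int × Int
  | 0, x, _ => (0, x)
  | fuel+1, x, p =>
    if PySem.Int.mod x p = 0 then
      let r := countDivB fuel (PySem.Int.floordiv x p) p
      (r.1 + 1, r.2)
    else (0, x)

-- one iteration of the sieve loop (`for i in range(2, n)`); `if spf[j] == 0: spf[j] = i`
-- is the conditional store on the current cell, written as a modify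
def sieveStepB (bound : Int) (spf : List Int) (i : Int) : List Int :=
  if spf.getD i.toNat 0 = 0 then
    (PySem.List.pyRange i (bound+1) i).foldl
      (fun acc j => acc.modify j.toNat (fun v => if v = 0 then i else v)) spf
  else spf

-- `while x > 1: p = spf[x]; <count loop>; f[p] = c`; the fuel m.toNat + 1 passed at the call
-- site bounds the iteration count (x strictly decreases); proved sufficient below
def factorLoopB (spf : List Int) : Nat → Int → PySem.Dict Int Int → PySem.Dict Int Int
  | 0, _, f => f
  | fuel+1, x, f =>
    if 1 < x then
      let p := spf.getD x.toNat 0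
      let r := countDivB x.toNat x p
      factorLoopB spf fuel r.2 (f.insert p r.1)
    else f

def init_factorization_py_alt (bound : Int) : List (List (Int × Int)) :=
  let spf0 := (PySem.List.pyRange 0 (bound+1) 1).map (fun _ => (0:Int))
  let spf := (PySem.List.pyRange 2 (bound+1) 1).foldl (sieveStepB bound) spf0
  let result0 := (PySem.List.pyRange 0 (bound+1) 1).map (fun _ => (PySem.Dict.empty : PySem.Dict Int Int))
  let result := (PySem.List.pyRange 2 (bound+1) 1).foldl
      (fun acc m => acc.modify m.toNat (fun f => factorLoopB spf (m.toNat + 1) m f)) result0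
  result.map PySem.Dict.items

-- ===== PRECONDITION & SPEC =====
def Spec_init_factorization_py (bound : Int) (out : List (List (Int × Int))) : Prop := out = init_factorization_py_alt bound
instance (bound : Int) (out : List (List (Int × Int))) : Decidable (Spec_init_factorization_py bound out) := by unfold Spec_init_factorization_py; infer_instance

-- ===== CLAIM (what is proved, stated in full; the proofs are below) =====
def Claim_equal_init_factorization_py : Prop := ∀ (bound : Int), Dom_init_factorization_py bound → Spec_init_factorization_py bound (init_factorization_py bound)

-- ===== LEMMAS AND PROOFS =====

-- the reference value: ascending list of (prime, multiplicity) pairs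
def upTo (K j : Nat) : List (Int × Int) :=
  ((List.range (K+1)).filter (fun p => decide (Nat.Prime p ∧ p ∣ j))).map
    (fun p : Nat => ((p : Int), (j.factorization p : Int)))

def refFacts (j : Nat) : List (Int × Int) := upTo j j

lemma upTo_succ (K j : Nat) :
    upTo (K+1) j = upTo K j ++
      (if (K+1).Prime ∧ (K+1) ∣ j then [(((K+1 : Nat) : Int), (j.factorization (K+1) : Int))] else []) := by
  unfold upTo
  rw [List.range_succ, List.filter_append, List.map_append]
  congr 1
  by_cases h : (K+1).Prime ∧ (K+1) ∣ j <;> simp [h]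


lemma upTo_extend {K K' j : Nat} (hKK' : K ≤ K')
    (h : ∀ q, K < q → q ≤ K' → ¬(q.Prime ∧ q ∣ j)) : upTo K' j = upTo K j := by
  induction K', hKK' using Nat.le_induction with
  | base => rfl
  | succ n hn ih =>
    rw [upTo_succ, ih (fun q h1 h2 => h q h1 (by omega))]
    have := h (n+1) (by omega) (by omega)
    simp [this]


lemma upTo_key_lt {K j : Nat} {pr : Int × Int} (h : pr ∈ upTo K j) :
    ∃ p : Nat, pr.1 = (p : Int) ∧ p ≤ K ∧ p.Prime ∧ p ∣ j := by
  unfold upTo at h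
  simp only [List.mem_map, List.mem_filter, List.mem_range, decide_eq_true_eq] at h
  obtain ⟨p, ⟨hr, hpp, hpd⟩, rfl⟩ := h
  exact ⟨p, rfl, by omega, hpp, hpd⟩


-- dict helpers on explicit item lists
lemma dict_getD_last {pre : List (Int × Int)} {i c : Int} (h : ∀ pr ∈ pre, pr.1 ≠ i) :
    (PySem.Dict.mk (pre ++ [(i, c)])).getD i 0 = c := by
  induction pre with
  | nil => simp [PySem.Dict.getD, PySem.Dict.get?]
  | cons a l ih =>
    have ha : (a.1 == i) = false := by simpa using h a (by simp)
    simp only [PySem.Dict.getD, PySem.Dict.get?] at ih ⊢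
    simp only [List.cons_append, List.find?_cons, ha]
    exact ih (fun pr hpr => h pr (by simp [hpr]))


lemma dict_contains_append {pre : List (Int × Int)} {i c : Int} :
    (PySem.Dict.mk (pre ++ [(i, c)])).contains i = true := by
  unfold PySem.Dict.contains
  simp


lemma dict_insert_last {pre : List (Int × Int)} {i c : Int} (h : ∀ pr ∈ pre, pr.1 ≠ i) (v : Int) :
    (PySem.Dict.mk (pre ++ [(i, c)])).insert i v = PySem.Dict.mk (pre ++ [(i, v)]) := by
  unfold PySem.Dict.insert
  rw [if_pos dict_contains_append]
  congr 1
  simp only [List.map_append]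
  congr 1
  · conv_rhs => rw [← List.map_id pre]
    apply List.map_congr_left
    intro pr hpr
    simp [show ¬ ((pr.1 == i) = true) by simpa using h pr hpr]
  · simp


lemma dict_insert_fresh {l : List (Int × Int)} {k : Int} (h : ∀ pr ∈ l, pr.1 ≠ k) (v : Int) :
    (PySem.Dict.mk l).insert k v = PySem.Dict.mk (l ++ [(k, v)]) := by
  have hc : ¬ ((PySem.Dict.mk l).contains k = true) := by
    simp only [PySem.Dict.contains, List.any_eq_true]
    rintro ⟨pr, hpr, he⟩
    exact h pr hpr (by simpa using he)
  unfold PySem.Dict.insert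
  rw [if_neg hc]


lemma dict_modify_last {pre : List (Int × Int)} {i c : Int} (h : ∀ pr ∈ pre, pr.1 ≠ i) :
    (PySem.Dict.mk (pre ++ [(i, c)])).modify i 0 (· + 1) = PySem.Dict.mk (pre ++ [(i, c + 1)]) := by
  unfold PySem.Dict.modify
  rw [dict_getD_last h, dict_insert_last h]


-- generic per-index characterisation of a fold of modifies at distinct indices
lemma foldl_modify_getElem? {α : Type} (g : Int → α → α) :
    ∀ (L : List Int), (∀ x ∈ L, 0 ≤ x) → L.Nodup → ∀ (xs : List α) (t : Nat),
    (L.foldl (fun acc j => acc.modify j.toNat (g j)) xs)[t]? =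
      if ((t : Int) ∈ L) then (g (t : Int)) <$> xs[t]? else xs[t]? := by
  intro L
  induction L with
  | nil => intro _ _ xs t; simp
  | cons a l ih =>
    intro hpos hnd xs t
    simp only [List.foldl_cons]
    rw [ih (fun x hx => hpos x (by simp [hx])) hnd.of_cons]
    have ha0 : 0 ≤ a := hpos a (by simp)
    by_cases hm : (t : Int) ∈ l
    · have hat : a ≠ (t : Int) := by
        intro hcontra; subst hcontra; exact (List.nodup_cons.mp hnd).1 hm
      have h1 : a.toNat ≠ t := by omega
      rw [if_pos hm, if_pos (List.mem_cons_of_mem _ hm), List.getElem?_modify]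
      cases xs[t]? <;> simp [h1]
    · by_cases hat : a = (t : Int)
      · have h1 : a.toNat = t := by omega
        rw [if_neg hm, if_pos (by simp [hat]), List.getElem?_modify]
        cases xs[t]? <;> simp [hat]
      · have h1 : a.toNat ≠ t := by omega
        have h2 : ¬ ((t : Int) ∈ a :: l) := by
          intro hmem
          rcases List.mem_cons.mp hmem with hh | hh
          · exact hat hh.symm
          · exact hm hh
        rw [if_neg hm, if_neg h2, List.getElem?_modify]
        cases xs[t]? <;> simp [h1]


lemma foldl_set_getElem? {α : Type} (v : α) :
    ∀ (L : List Int), (∀ x ∈ L, 0 ≤ x) → ∀ (xs : List α) (t : Nat), t < xs.length →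
    (L.foldl (fun acc j => acc.set j.toNat v) xs)[t]? =
      if ((t : Int) ∈ L) then some v else xs[t]? := by
  intro L
  induction L with
  | nil => intro _ xs t _; simp
  | cons a l ih =>
    intro hpos xs t ht
    simp only [List.foldl_cons]
    have ha0 : 0 ≤ a := hpos a (by simp)
    rw [ih (fun x hx => hpos x (by simp [hx])) _ t (by simpa using ht)]
    by_cases hm : (t : Int) ∈ l
    · rw [if_pos hm, if_pos (by simp [hm])]
    · rw [if_neg hm, List.getElem?_set]
      by_cases hat : a = (t : Int)
      · simp [ht, hat]
      · have h1 : a.toNat ≠ t := by omega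
        have h3 : ¬ (t : Int) = a := fun hh => hat hh.symm
        simp [h1, hm, h3]


lemma foldl_set_length {α : Type} (v : α) (L : List Int) (xs : List α) :
    (L.foldl (fun acc j => acc.set j.toNat v) xs).length = xs.length := by
  induction L generalizing xs with
  | nil => rfl
  | cons a l ih => simp [ih]


lemma foldl_modify_length {α : Type} (g : Int → α → α) (L : List Int) (xs : List α) :
    (L.foldl (fun acc j => acc.modify j.toNat (g j)) xs).length = xs.length := by
  induction L generalizing xs with
  | nil => rfl
  | cons a l ih => simp [ih]


lemma phase1_split (i : Int) (L : List Int) (s1 : List (PySem.Dict Int Int)) (s2 : List Bool) :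
    L.foldl (fun acc (j : Int) =>
        (acc.1.modify j.toNat (fun dic => dic.insert i 1), acc.2.set j.toNat true)) (s1, s2) =
      (L.foldl (fun a (j : Int) => a.modify j.toNat (fun dic => dic.insert i 1)) s1,
       L.foldl (fun b (j : Int) => b.set j.toNat true) s2) := by
  induction L generalizing s1 s2 with
  | nil => rfl
  | cons c l ih => simp [ih]


lemma nodup_pyRange_pos {a b s : Int} (hs : 0 < s) : (PySem.List.pyRange a b s).Nodup := by
  rw [PySem.List.pyRange_of_pos _ _ hs]
  refine List.Nodup.map ?_ (List.nodup_range)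
  intro x y hxy
  have h1 : s * (x : Int) = s * (y : Int) := add_left_cancel hxy
  have h2 := mul_left_cancel₀ (by omega : s ≠ 0) h1
  exact_mod_cast h2


lemma mem_pyRange_mult {i b x : Int} (hi : 0 < i) :
    x ∈ PySem.List.pyRange i b i ↔ i ∣ x ∧ i ≤ x ∧ x < b := by
  rw [PySem.List.mem_pyRange_iff_of_pos hi]
  constructor
  · rintro ⟨h1, h2, h3⟩
    exact ⟨(dvd_sub_right dvd_rfl).mp (by simpa using h3), h1, h2⟩
  · rintro ⟨h1, h2, h3⟩
    exact ⟨h2, h3, dvd_sub h1 dvd_rfl⟩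


-- number of increments powLoopA applies at index t, as a recursion shadowing powLoopA
def addCnt (bound i t : Int) : Nat → Int → Int
  | 0, _ => 0
  | fuel+1, d => if d ≤ bound then (if d ∣ t ∧ d ≤ t then 1 else 0) + addCnt bound i t fuel (d * i) else 0

lemma powLoopA_length (bound i : Int) (fuel : Nat) (d : Int) (res : List (PySem.Dict Int Int)) :
    (powLoopA bound i fuel d res).length = res.length := by
  induction fuel generalizing d res with
  | zero => rfl
  | succ fuel ih =>
    simp only [powLoopA]
    split
    · rw [ih, foldl_modify_length]
    · rfl


lemma powLoopA_skip {bound i : Int} (hi : 0 < i) {t : Nat} (hnot : ¬ ((i ∣ (t : Int)) ∧ 1 ≤ t)) :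
    ∀ (fuel : Nat) (d : Int) (res : List (PySem.Dict Int Int)), 0 < d → i ∣ d →
    (powLoopA bound i fuel d res)[t]? = res[t]? := by
  intro fuel
  induction fuel with
  | zero => intro d res _ _; rfl
  | succ fuel ih =>
    intro d res hd hid
    simp only [powLoopA]
    split
    · rw [ih (d*i) _ (by positivity) (Dvd.dvd.mul_left dvd_rfl d),
        foldl_modify_getElem? _ _ (fun x hx => ?_) (nodup_pyRange_pos hd)]
      · rw [if_neg ?_]
        intro hmem
        obtain ⟨h1, h2, _⟩ := (mem_pyRange_mult hd).mp hmem
        exact hnot ⟨dvd_trans hid h1, by omega⟩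
      · have := (mem_pyRange_mult hd).mp hx
        omega
    · rfl


lemma powLoopA_items {bound i : Int} (hi2 : 2 ≤ i) {pre : List (Int × Int)}
    (hpre : ∀ pr ∈ pre, pr.1 ≠ i) {t : Nat} (_h1 : 1 ≤ t) (htb : (t : Int) ≤ bound) :
    ∀ (fuel : Nat) (d : Int), 2 ≤ d → ∀ (c : Int) (res : List (PySem.Dict Int Int)),
    res[t]? = some (PySem.Dict.mk (pre ++ [(i, c)])) →
    (powLoopA bound i fuel d res)[t]? =
      some (PySem.Dict.mk (pre ++ [(i, c + addCnt bound i (t : Int) fuel d)])) := by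
  intro fuel
  induction fuel with
  | zero =>
    intro d _ c res hres
    simp only [powLoopA, addCnt]
    simpa using hres
  | succ fuel ih =>
    intro d hd c res hres
    have hd0 : (0:Int) < d := by omega
    simp only [powLoopA, addCnt]
    split
    · rename_i hle
      have hfold : (List.foldl (fun r j => r.modify j.toNat (fun dic => dic.modify i 0 (· + 1))) res
            (PySem.List.pyRange d (bound+1) d))[t]? =
          if ((t : Int) ∈ PySem.List.pyRange d (bound+1) d)
          then (fun dic => dic.modify i 0 (· + 1)) <$> res[t]? else res[t]? :=
        foldl_modify_getElem? (fun _ dic => dic.modify i 0 (· + 1)) _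
          (fun x hx => by have := (mem_pyRange_mult hd0).mp hx; omega)
          (nodup_pyRange_pos hd0) res t
      by_cases hmem : (t : Int) ∈ PySem.List.pyRange d (bound+1) d
      · obtain ⟨hm1, hm2, _⟩ := (mem_pyRange_mult hd0).mp hmem
        have hres2 : (List.foldl (fun r j => r.modify j.toNat (fun dic => dic.modify i 0 (· + 1))) res
              (PySem.List.pyRange d (bound+1) d))[t]? =
            some (PySem.Dict.mk (pre ++ [(i, c + 1)])) := by
          rw [hfold, if_pos hmem, hres]
          simp [dict_modify_last hpre]
        rw [ih (d*i) (by nlinarith) (c+1) _ hres2, if_pos ⟨hm1, hm2⟩, add_assoc]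
      · have hres2 : (List.foldl (fun r j => r.modify j.toNat (fun dic => dic.modify i 0 (· + 1))) res
              (PySem.List.pyRange d (bound+1) d))[t]? = some (PySem.Dict.mk (pre ++ [(i, c)])) := by
          rw [hfold, if_neg hmem, hres]
        have hnotc : ¬ (d ∣ (t:Int) ∧ d ≤ (t:Int)) := by
          intro ⟨hc1, hc2⟩
          exact hmem ((mem_pyRange_mult hd0).mpr ⟨hc1, hc2, by omega⟩)
        rw [ih (d*i) (by nlinarith) c _ hres2, if_neg hnotc, zero_add]
    · rw [add_zero]
      exact hres


lemma addCnt_pow {bound : Int} {ip tp : Nat} (hp : ip.Prime) (ht1 : 1 ≤ tp)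
    (htb : (tp : Int) ≤ bound) :
    ∀ (fuel : Nat) (k : Nat), 1 ≤ k → (bound + 1 - (ip : Int)^k).toNat < fuel →
    addCnt bound (ip : Int) (tp : Int) fuel ((ip : Int)^k) =
      max ((tp.factorization ip : Int) + 1 - k) 0 := by
  have hip2 : 2 ≤ ip := hp.two_le
  have htp0 : tp ≠ 0 := by omega
  intro fuel
  induction fuel with
  | zero => intro k _ hf; omega
  | succ fuel ih =>
    intro k hk hf
    have hP2 : (2:Int) ≤ (ip:Int)^k := by
      calc (2:Int) ≤ (ip:Int) := by exact_mod_cast hip2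
        _ ≤ (ip:Int)^k := by
          exact_mod_cast Nat.le_self_pow (by omega) ip
    simp only [addCnt]
    split
    · rename_i hle
      have hpow : (ip:Int)^k * (ip:Int) = (ip:Int)^(k+1) := (pow_succ _ _).symm
      have hgrow : (ip:Int)^k + 2 ≤ (ip:Int)^(k+1) := by
        rw [← hpow]
        nlinarith
      have hcond : ((ip:Int)^k ∣ (tp:Int) ∧ (ip:Int)^k ≤ (tp:Int)) ↔ k ≤ tp.factorization ip := by
        constructor
        · rintro ⟨h1, _⟩
          have : ip^k ∣ tp := by exact_mod_cast h1
          exact (Nat.Prime.pow_dvd_iff_le_factorization hp htp0).mp this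
        · intro hkv
          have h1 : ip^k ∣ tp := (Nat.Prime.pow_dvd_iff_le_factorization hp htp0).mpr hkv
          have h2 : ip^k ≤ tp := Nat.le_of_dvd (by omega) h1
          exact ⟨by exact_mod_cast h1, by exact_mod_cast h2⟩
      rw [hpow, ih (k+1) (by omega) (by omega)]
      by_cases hkv : k ≤ tp.factorization ip
      · rw [if_pos (hcond.mpr hkv)]
        omega
      · rw [if_neg (fun hc => hkv (hcond.mp hc))]
        omega
    · rename_i hle
      have hvd : ip ^ (tp.factorization ip) ∣ tp := Nat.ordProj_dvd tp ip
      have hvle : ip ^ (tp.factorization ip) ≤ tp := Nat.le_of_dvd (by omega) hvd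
      have hlt : (ip:Int)^(tp.factorization ip) < (ip:Int)^k := by
        calc (ip:Int)^(tp.factorization ip) ≤ (tp:Int) := by exact_mod_cast hvle
          _ ≤ bound := htb
          _ < (ip:Int)^k := by omega
      have hip1 : (1:Int) ≤ (ip:Int) := by exact_mod_cast (by omega : 1 ≤ ip)
      have : tp.factorization ip < k := by
        by_contra hcon
        have : (ip:Int)^k ≤ (ip:Int)^(tp.factorization ip) :=
          pow_le_pow_right₀ hip1 (by omega)
        omega
      omega


-- the per-index contents of A's state after the outer loop has processed i = 2 .. K
def itemsAt (K : Int) (j : Nat) : List (Int × Int) := if j = 0 then [] else upTo K.toNat j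

def visAt (K : Int) (j : Nat) : Bool := decide (2 ≤ j ∧ ∃ p ≤ K.toNat, p.Prime ∧ p ∣ j)

def InvA (bound K : Int) (st : List (PySem.Dict Int Int) × List Bool) : Prop :=
  st.1.length = (bound+1).toNat ∧ st.2.length = (bound+1).toNat ∧
  ∀ j : Nat, j < (bound+1).toNat →
    st.1[j]? = some (PySem.Dict.mk (itemsAt K j)) ∧ st.2[j]? = some (visAt K j)

lemma stepA_inv {bound K : Int} (hK : 1 ≤ K) (hKb : K + 1 ≤ bound)
    {st : List (PySem.Dict Int Int) × List Bool} (h : InvA bound K st) :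
    InvA bound (K+1) (stepA bound st (K+1)) := by
  obtain ⟨s1, s2⟩ := st
  obtain ⟨hl1, hl2, hidx⟩ := h
  set n := (bound+1).toNat with hn
  have hb0 : (0:Int) < bound + 1 := by omega
  set ip : Nat := (K+1).toNat with hip
  have hi : K + 1 = (ip : Int) := by omega
  have hip2 : 2 ≤ ip := by omega
  have hin : ip < n := by omega
  have hKt : (K+1).toNat = K.toNat + 1 := by omega
  have hread : (s1, s2).2.getD (K+1).toNat false = visAt K ip := by
    rw [List.getD_eq_getElem?_getD, (hidx ip hin).2]
    rfl
  unfold stepA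
  rw [hread]
  by_cases hv : visAt K ip = true
  · -- i is composite: nothing changes
    rw [hv, if_pos rfl]
    have hnp : ¬ ip.Prime := by
      have hex := of_decide_eq_true hv
      obtain ⟨-, p, hpK, hpp, hpd⟩ := hex
      intro hipp
      rcases (Nat.Prime.eq_one_or_self_of_dvd hipp p hpd) with he1 | he1
      · exact hpp.one_lt.ne' he1
      · omega
    refine ⟨hl1, hl2, fun j hj => ?_⟩
    obtain ⟨hr, hv2⟩ := hidx j hj
    constructor
    · rw [hr]
      have : itemsAt (K+1) j = itemsAt K j := by
        unfold itemsAt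
        split
        · rfl
        · rw [hKt, upTo_succ]
          rw [if_neg (fun hc => hnp (by rw [hip, hKt]; exact hc.1))]
          simp
      rw [this]
    · rw [hv2]
      have : visAt (K+1) j = visAt K j := by
        unfold visAt
        rw [decide_eq_decide]
        rw [hKt]
        constructor
        · rintro ⟨hj2, p, hpK, hpp, hpd⟩
          refine ⟨hj2, p, ?_, hpp, hpd⟩
          rcases Nat.lt_or_ge p (K.toNat + 1) with hlt | hge
          · omega
          · exfalso
            have hpe : p = ip := by omega
            exact hnp (hpe ▸ hpp)
        · rintro ⟨hj2, p, hpK, hpp, hpd⟩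
          exact ⟨hj2, p, by omega, hpp, hpd⟩
      rw [this]
  · -- i is prime: phase 1 and phase 2 run
    rw [Bool.not_eq_true] at hv
    rw [hv, if_neg (by simp)]
    have hipp : ip.Prime := by
      by_contra hnp
      have hmf : ip.minFac.Prime := Nat.minFac_prime (by omega)
      have hmfd : ip.minFac ∣ ip := Nat.minFac_dvd ip
      have hmfne : ip.minFac ≠ ip := fun hc => hnp (Nat.prime_def_minFac.mpr ⟨hip2, hc⟩)
      have hmfle : ip.minFac ≤ ip := Nat.le_of_dvd (by omega) hmfd
      have : visAt K ip = true := by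
        unfold visAt
        rw [decide_eq_true_eq]
        exact ⟨hip2, ip.minFac, by omega, hmf, hmfd⟩
      rw [this] at hv
      cases hv
    have hi0 : (0:Int) < K + 1 := by omega
    -- split the pair fold (and zeta-reduce the let)
    simp only [phase1_split]
    set M := PySem.List.pyRange (K+1) (bound+1) (K+1) with hM
    have hMpos : ∀ x ∈ M, 0 ≤ x := fun x hx => by
      have := (mem_pyRange_mult hi0).mp hx; omega
    have hMnd : M.Nodup := nodup_pyRange_pos hi0
    have hMem : ∀ t : Nat, t < n → ((t : Int) ∈ M ↔ ip ∣ t ∧ 1 ≤ t) := by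
      intro t ht
      rw [hM, mem_pyRange_mult hi0]
      constructor
      · rintro ⟨h1, h2, h3⟩
        refine ⟨?_, by omega⟩
        have : (ip : Int) ∣ (t : Int) := hi ▸ h1
        exact_mod_cast this
      · rintro ⟨h1, h2⟩
        have hd : (K+1) ∣ (t : Int) := by rw [hi]; exact_mod_cast h1
        have : ip ≤ t := Nat.le_of_dvd (by omega) h1
        exact ⟨hd, by omega, by omega⟩
    refine ⟨?_, ?_, fun j hj => ?_⟩
    · rw [powLoopA_length, foldl_modify_length]; exact hl1
    · rw [foldl_set_length]; exact hl2
    obtain ⟨hr, hv2⟩ := hidx j hj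
    have hres1 : (M.foldl (fun acc (j : Int) => acc.modify j.toNat (fun dic => dic.insert (K+1) 1)) s1)[j]? =
        if ((j : Int) ∈ M) then ((fun dic => dic.insert (K+1) 1) <$> s1[j]?) else s1[j]? :=
      foldl_modify_getElem? (fun _ dic => dic.insert (K+1) 1) M hMpos hMnd s1 j
    constructor
    · -- result component
      by_cases hc : ip ∣ j ∧ 1 ≤ j
      · have hj0 : j ≠ 0 := by omega
        have hfresh : ∀ pr ∈ upTo K.toNat j, pr.1 ≠ K + 1 := by
          intro pr hpr
          obtain ⟨p, hp1, hp2, -, -⟩ := upTo_key_lt hpr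
          rw [hp1, hi]
          intro hcast
          have : p = ip := by exact_mod_cast hcast
          omega
        have hitems : itemsAt K j = upTo K.toNat j := by unfold itemsAt; rw [if_neg hj0]
        have hres2 : (M.foldl (fun acc (j : Int) => acc.modify j.toNat (fun dic => dic.insert (K+1) 1)) s1)[j]? =
            some (PySem.Dict.mk (upTo K.toNat j ++ [(K+1, 1)])) := by
          rw [hres1, if_pos ((hMem j hj).mpr hc), hr, hitems]
          simp [dict_insert_fresh hfresh]
        have hv1 : 1 ≤ j.factorization ip := by
          rw [← Nat.Prime.dvd_iff_one_le_factorization hipp (by omega)]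
          exact hc.1
        have hpow2 : (4:Int) ≤ (ip:Int)^2 := by
          have : (4:Nat) ≤ ip^2 := by nlinarith
          exact_mod_cast this
        rw [powLoopA_items (by omega) hfresh (by omega) (by omega) _ ((K+1)^2) (by nlinarith) 1 _ hres2]
        rw [hi, addCnt_pow hipp (by omega) (by omega) _ 2 (by omega) (by omega)]
        have hmax : 1 + max ((j.factorization ip : Int) + 1 - ((2:Nat):Int)) 0 = (j.factorization ip : Int) := by
          rw [max_eq_left (by push_cast; omega)]
          push_cast
          omega
        rw [hmax]
        unfold itemsAt
        rw [if_neg hj0, Int.toNat_natCast]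
        have hipK : ip = K.toNat + 1 := by omega
        rw [hipK, upTo_succ, if_pos ⟨by rw [← hipK]; exact hipp, by rw [← hipK]; exact hc.1⟩]
      · have hnotc : ¬ ((K+1) ∣ ((j:Nat) : Int) ∧ 1 ≤ j) := by
          intro ⟨hd, hj1⟩
          refine hc ⟨?_, hj1⟩
          have : (ip:Int) ∣ (j:Int) := hi ▸ hd
          exact_mod_cast this
        rw [powLoopA_skip hi0 hnotc _ _ _ (by positivity) (by rw [sq]; exact Dvd.intro _ rfl),
          hres1, if_neg (fun hm => hc ((hMem j hj).mp hm)), hr]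
        have : itemsAt (K+1) j = itemsAt K j := by
          unfold itemsAt
          split
          · rfl
          · rename_i hj0
            rw [hKt, upTo_succ, if_neg (fun hcc => hc ⟨by
              have h2 := hcc.2
              rwa [show K.toNat + 1 = ip from by omega] at h2, by omega⟩)]
            simp
        rw [this]
    · -- visited component
      rw [foldl_set_getElem? true M hMpos s2 j (by simp only at hl2; omega)]
      by_cases hc : ip ∣ j ∧ 1 ≤ j
      · rw [if_pos ((hMem j hj).mpr hc)]
        have : visAt (K+1) j = true := by
          unfold visAt
          rw [decide_eq_true_eq, hKt]
          have hj2 : 2 ≤ j := by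
            have := Nat.le_of_dvd (by omega) hc.1
            omega
          exact ⟨hj2, ip, by omega, hipp, hc.1⟩
        rw [this]
      · rw [if_neg (fun hm => hc ((hMem j hj).mp hm)), hv2]
        have : visAt (K+1) j = visAt K j := by
          unfold visAt
          rw [decide_eq_decide, hKt]
          constructor
          · rintro ⟨hj2, p, hpK, hpp, hpd⟩
            refine ⟨hj2, p, ?_, hpp, hpd⟩
            rcases Nat.lt_or_ge p (K.toNat + 1) with hlt | hge
            · omega
            · exfalso
              have hpip : p = ip := by omega
              exact hc ⟨hpip ▸ hpd, by omega⟩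
          · rintro ⟨hj2, p, hpK, hpp, hpd⟩
            exact ⟨hj2, p, by omega, hpp, hpd⟩
        rw [this]


lemma upTo_zero (j : Nat) : upTo 0 j = [] := by
  simp [upTo, List.range_succ, Nat.not_prime_zero]

lemma upTo_one (j : Nat) : upTo 1 j = [] := by
  simp [upTo, List.range_succ, Nat.not_prime_zero, Nat.not_prime_one]

lemma refFacts_of_le_one {j : Nat} (hj : j ≤ 1) : refFacts j = [] := by
  unfold refFacts
  interval_cases j
  · exact upTo_zero 0
  · exact upTo_one 1

lemma outerA_inv {bound : Int} (hb : 2 ≤ bound) :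
    ∀ K : Int, 1 ≤ K → K ≤ bound →
    InvA bound K ((PySem.List.pyRange 2 (K+1) 1).foldl (stepA bound)
      ((PySem.List.pyRange 0 (bound+1) 1).map (fun _ => (PySem.Dict.empty : PySem.Dict Int Int)),
       (PySem.List.pyRange 0 (bound+1) 1).map (fun _ => false))) := by
  intro K hK1
  induction K, hK1 using Int.le_induction with
  | base =>
    intro _
    rw [PySem.List.pyRange_one_eq_nil (by omega : (1:Int) + 1 ≤ 2), List.foldl_nil]
    have hlen : (PySem.List.pyRange 0 (bound+1) 1).length = (bound+1).toNat := by
      rw [PySem.List.length_pyRange_one]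
      omega
    refine ⟨by simp [hlen], by simp [hlen], fun j hj => ?_⟩
    have hjl : j < (PySem.List.pyRange 0 (bound+1) 1).length := by omega
    have hitems : itemsAt 1 j = [] := by
      unfold itemsAt
      split
      · rfl
      · exact upTo_one j
    have hvis : visAt 1 j = false := by
      unfold visAt
      rw [decide_eq_false_iff_not]
      rintro ⟨-, p, hp1, hpp, -⟩
      have := hpp.two_le
      simp at hp1
      omega
    constructor
    · simp only [List.getElem?_map, List.getElem?_eq_getElem hjl, Option.map_some]
      rw [hitems]
      rfl
    · simp only [List.getElem?_map, List.getElem?_eq_getElem hjl, Option.map_some]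
      rw [hvis]
  | succ K hK1 ih =>
    intro hKb
    have prev := ih (by omega)
    rw [PySem.List.pyRange_one_succ_right (by omega : (2:Int) ≤ K + 1), List.foldl_append,
      List.foldl_cons, List.foldl_nil]
    exact stepA_inv hK1 hKb prev


lemma itemsAt_bound_eq_refFacts {bound : Int} {j : Nat} (hj : j < (bound+1).toNat) :
    itemsAt bound j = refFacts j := by
  by_cases hj0 : j = 0
  · subst hj0
    unfold itemsAt
    rw [if_pos rfl, refFacts_of_le_one (by omega)]
  · unfold itemsAt
    rw [if_neg hj0]
    have hj1 : 1 ≤ j := by omega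
    have hjb : j ≤ bound.toNat := by omega
    rw [upTo_extend hjb (fun q hq1 hq2 => fun ⟨_, hqd⟩ => by
      have := Nat.le_of_dvd (by omega) hqd
      omega)]
    rfl


lemma portA_eq (bound : Int) :
    init_factorization_py bound = (List.range (bound+1).toNat).map refFacts := by
  have hdef : init_factorization_py bound =
      (((PySem.List.pyRange 2 (bound+1) 1).foldl (stepA bound)
        ((PySem.List.pyRange 0 (bound+1) 1).map (fun _ => (PySem.Dict.empty : PySem.Dict Int Int)),
         (PySem.List.pyRange 0 (bound+1) 1).map (fun _ => false))).1).map PySem.Dict.items := rfl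
  rw [hdef]
  by_cases hb : 2 ≤ bound
  · obtain ⟨hl1, -, hidx⟩ := outerA_inv hb bound (by omega) le_rfl
    apply List.ext_getElem?
    intro j
    rw [List.getElem?_map, List.getElem?_map]
    by_cases hjn : j < (bound+1).toNat
    · rw [(hidx j hjn).1, List.getElem?_eq_getElem (by simpa using hjn)]
      simp only [Option.map_some, List.getElem_range]
      rw [itemsAt_bound_eq_refFacts hjn]
    · rw [List.getElem?_eq_none (by rw [hl1]; omega),
        List.getElem?_eq_none (by rw [List.length_range]; omega)]
      rfl
  · rw [PySem.List.pyRange_one_eq_nil (show bound + 1 ≤ 2 by omega), List.foldl_nil]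
    by_cases hb0 : bound + 1 ≤ 0
    · rw [PySem.List.pyRange_one_eq_nil hb0]
      have h0 : (bound+1).toNat = 0 := by omega
      rw [h0]
      rfl
    · rw [show bound + 1 = (((bound+1).toNat : Nat) : Int) by omega, PySem.List.pyRange_zero_natCast]
      rw [List.map_map, List.map_map]
      apply List.map_congr_left
      intro k hk
      have hkn : k < (bound+1).toNat := List.mem_range.mp hk
      have hk1 : k ≤ 1 := by omega
      simp only [Function.comp]
      rw [refFacts_of_le_one hk1]
      rfl

-- ===== B-side lemmas =====
lemma countDivB_spec {p : Nat} (hp : p.Prime) :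
    ∀ (fuel x : Nat), 1 ≤ x → x.factorization p ≤ fuel →
    countDivB fuel (x : Int) (p : Int) =
      ((x.factorization p : Int), ((x / p ^ x.factorization p : Nat) : Int)) := by
  intro fuel
  induction fuel with
  | zero =>
    intro x hx hf
    have hv0 : x.factorization p = 0 := by omega
    rw [hv0]
    simp [countDivB]
  | succ fuel ih =>
    intro x hx hf
    have hp2 : 2 ≤ p := hp.two_le
    have hmod : PySem.Int.mod (x:Int) (p:Int) = ((x % p : Nat) : Int) :=
      (Int.ofNat_fmod x p).symm
    simp only [countDivB]
    by_cases hdvd : p ∣ x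
    · have hm0 : x % p = 0 := Nat.dvd_iff_mod_eq_zero.mp hdvd
      have hcond : PySem.Int.mod (x:Int) (p:Int) = 0 := by rw [hmod, hm0]; simp
      rw [if_pos hcond]
      have hdivcast : PySem.Int.floordiv (x:Int) (p:Int) = ((x / p : Nat) : Int) :=
        (Int.ofNat_fdiv x p).symm
      rw [hdivcast]
      set v := x.factorization p with hv
      have hv1 : 1 ≤ v := (Nat.Prime.dvd_iff_one_le_factorization hp (by omega)).mp hdvd
      have hxp1 : 1 ≤ x / p := Nat.div_pos (Nat.le_of_dvd (by omega) hdvd) (by omega)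
      have hvdiv : (x / p).factorization p = v - 1 := by
        rw [Nat.factorization_div hdvd]
        simp [Nat.Prime.factorization_self hp, hv]
      rw [ih (x / p) hxp1 (by omega), hvdiv]
      have hpv : p * p ^ (v - 1) = p ^ v := by
        conv_rhs => rw [show v = v - 1 + 1 from by omega]
        rw [pow_succ']
      have hdd : x / p / p ^ (v - 1) = x / p ^ v := by
        rw [Nat.div_div_eq_div_mul, hpv]
      rw [hdd, Prod.mk.injEq]
      exact ⟨by omega, rfl⟩
    · have hm0 : x % p ≠ 0 := fun hc => hdvd (Nat.dvd_of_mod_eq_zero hc)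
      rw [if_neg (by rw [hmod]; exact_mod_cast hm0)]
      have hv0 : x.factorization p = 0 := Nat.factorization_eq_zero_of_not_dvd hdvd
      rw [hv0]
      simp


-- the contents of the spf table after the sieve has processed i = 2 .. K
def spfAt (K : Int) (j : Nat) : Int :=
  if 2 ≤ j ∧ (j.minFac : Int) ≤ K then (j.minFac : Int) else 0

def InvS (bound K : Int) (spf : List Int) : Prop :=
  spf.length = (bound+1).toNat ∧
  ∀ j : Nat, j < (bound+1).toNat → spf[j]? = some (spfAt K j)

lemma spfAt_of_le {K : Int} {j : Nat} (hj2 : 2 ≤ j) (h : (j.minFac : Int) ≤ K) :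
    spfAt K j = (j.minFac : Int) := by
  unfold spfAt
  rw [if_pos ⟨hj2, h⟩]

lemma spfAt_of_gt {K : Int} {j : Nat} (h : ¬ ((j.minFac : Int) ≤ K)) : spfAt K j = 0 := by
  unfold spfAt
  rw [if_neg (fun hcc => h hcc.2)]

lemma spfAt_of_lt_two {K : Int} {j : Nat} (h : j < 2) : spfAt K j = 0 := by
  unfold spfAt
  rw [if_neg (fun hcc => by omega)]

lemma sieveStepB_inv {bound K : Int} (hK : 1 ≤ K) (hKb : K + 1 ≤ bound)
    {spf : List Int} (h : InvS bound K spf) :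
    InvS bound (K+1) (sieveStepB bound spf (K+1)) := by
  obtain ⟨hl, hidx⟩ := h
  set n := (bound+1).toNat with hn
  set ip : Nat := (K+1).toNat with hip
  have hi : K + 1 = (ip : Int) := by omega
  have hip2 : 2 ≤ ip := by omega
  have hin : ip < n := by omega
  have hi0 : (0:Int) < K + 1 := by omega
  have hread : spf.getD (K+1).toNat 0 = spfAt K ip := by
    rw [List.getD_eq_getElem?_getD, hidx ip hin]
    rfl
  have hmf2 : 2 ≤ ip.minFac := (Nat.minFac_prime (by omega)).two_le
  unfold sieveStepB
  rw [hread]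
  by_cases hz : spfAt K ip = 0
  · -- spf[i] == 0: i is prime, mark its multiples
    rw [if_pos hz]
    have hgtK : ¬ ((ip.minFac : Int) ≤ K) := by
      intro hle
      rw [spfAt_of_le hip2 hle] at hz
      omega
    have hipp : ip.Prime := by
      have hmfle : ip.minFac ≤ ip := Nat.minFac_le (by omega)
      have heq : ip.minFac = ip := by omega
      exact Nat.prime_def_minFac.mpr ⟨hip2, heq⟩
    set M := PySem.List.pyRange (K+1) (bound+1) (K+1) with hM
    have hMpos : ∀ x ∈ M, 0 ≤ x := fun x hx => by
      have := (mem_pyRange_mult hi0).mp hx; omega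
    have hMnd : M.Nodup := nodup_pyRange_pos hi0
    have hMem : ∀ t : Nat, t < n → ((t : Int) ∈ M ↔ ip ∣ t ∧ 1 ≤ t) := by
      intro t ht
      rw [hM, mem_pyRange_mult hi0]
      constructor
      · rintro ⟨h1, h2, h3⟩
        refine ⟨?_, by omega⟩
        have : (ip : Int) ∣ (t : Int) := hi ▸ h1
        exact_mod_cast this
      · rintro ⟨h1, h2⟩
        have hd : (K+1) ∣ (t : Int) := by rw [hi]; exact_mod_cast h1
        have : ip ≤ t := Nat.le_of_dvd (by omega) h1
        exact ⟨hd, by omega, by omega⟩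
    refine ⟨by rw [foldl_modify_length]; exact hl, fun j hj => ?_⟩
    rw [foldl_modify_getElem? (fun _ v => if v = 0 then K + 1 else v) M hMpos hMnd spf j]
    by_cases hc : ip ∣ j ∧ 1 ≤ j
    · rw [if_pos ((hMem j hj).mpr hc), hidx j hj,
        show ((fun v => if v = 0 then K + 1 else v) <$> some (spfAt K j)) =
          some (if spfAt K j = 0 then K + 1 else spfAt K j) from rfl]
      have hj2 : 2 ≤ j := by
        have := Nat.le_of_dvd (by omega) hc.1
        omega
      have hjmf2 : 2 ≤ j.minFac := (Nat.minFac_prime (by omega)).two_le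
      by_cases hold : (j.minFac : Int) ≤ K
      · rw [spfAt_of_le hj2 hold, spfAt_of_le hj2 (by omega),
          if_neg (by omega : ¬ ((j.minFac : Int) = 0))]
      · have hmfle : j.minFac ≤ ip := Nat.minFac_le_of_dvd hip2 hc.1
        have hmfip : (j.minFac : Int) = K + 1 := by omega
        rw [spfAt_of_gt hold, spfAt_of_le hj2 (by omega), if_pos rfl, hmfip]
    · rw [if_neg (fun hm => hc ((hMem j hj).mp hm)), hidx j hj]
      by_cases hj2 : 2 ≤ j
      · have hnemf : j.minFac ≠ ip := by
          intro hmfeq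
          exact hc ⟨hmfeq ▸ Nat.minFac_dvd j, by omega⟩
        by_cases hold : (j.minFac : Int) ≤ K
        · rw [spfAt_of_le hj2 hold, spfAt_of_le hj2 (by omega)]
        · rw [spfAt_of_gt hold, spfAt_of_gt (by
            intro hle
            exact hnemf (by omega))]
      · rw [spfAt_of_lt_two (by omega), spfAt_of_lt_two (by omega)]
  · rw [if_neg hz]
    -- spf[i] != 0: i is composite, so no cell can have minFac = K+1
    have hnp : ¬ ip.Prime := by
      intro hipp
      apply hz
      apply spfAt_of_gt
      rw [hipp.minFac_eq]
      omega
    refine ⟨hl, fun j hj => ?_⟩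
    rw [hidx j hj]
    by_cases hj2 : 2 ≤ j
    · have hnemf : j.minFac ≠ ip := by
        intro hmfeq
        exact hnp (hmfeq ▸ Nat.minFac_prime (by omega : j ≠ 1))
      by_cases hold : (j.minFac : Int) ≤ K
      · rw [spfAt_of_le hj2 hold, spfAt_of_le hj2 (by omega)]
      · rw [spfAt_of_gt hold, spfAt_of_gt (by
          intro hle
          exact hnemf (by omega))]
    · rw [spfAt_of_lt_two (by omega), spfAt_of_lt_two (by omega)]

lemma sieveB_inv {bound : Int} (hb : 2 ≤ bound) :
    ∀ K : Int, 1 ≤ K → K ≤ bound →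
    InvS bound K ((PySem.List.pyRange 2 (K+1) 1).foldl (sieveStepB bound)
      ((PySem.List.pyRange 0 (bound+1) 1).map (fun _ => (0:Int)))) := by
  intro K hK1
  induction K, hK1 using Int.le_induction with
  | base =>
    intro _
    rw [PySem.List.pyRange_one_eq_nil (by omega : (1:Int) + 1 ≤ 2), List.foldl_nil]
    have hlen : (PySem.List.pyRange 0 (bound+1) 1).length = (bound+1).toNat := by
      rw [PySem.List.length_pyRange_one]
      omega
    refine ⟨by simp [hlen], fun j hj => ?_⟩
    have hjl : j < (PySem.List.pyRange 0 (bound+1) 1).length := by omega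
    have hmf2 : ∀ hj2 : 2 ≤ j, 2 ≤ j.minFac := fun hj2 => (Nat.minFac_prime (by omega)).two_le
    have hspf1 : spfAt 1 j = 0 := by
      unfold spfAt
      rw [if_neg (by rintro ⟨hj2, hle⟩; have := hmf2 hj2; omega)]
    rw [hspf1]
    simp only [List.getElem?_map, List.getElem?_eq_getElem hjl, Option.map_some]
  | succ K hK1 ih =>
    intro hKb
    have prev := ih (by omega)
    rw [PySem.List.pyRange_one_succ_right (by omega : (2:Int) ≤ K + 1), List.foldl_append,
      List.foldl_cons, List.foldl_nil]
    exact sieveStepB_inv hK1 hKb prev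

lemma factorLoopB_spec {m : Nat} (hm : 1 ≤ m) (spfL : List Int)
    (hspf : ∀ x : Nat, 2 ≤ x → x ≤ m → spfL.getD x 0 = (x.minFac : Int)) :
    ∀ (fuel x b : Nat) (d : PySem.Dict Int Int),
    x < fuel → 1 ≤ x → x ∣ m → 1 ≤ b → b ≤ m →
    (∀ q, q.Prime → q ≤ b → ¬ q ∣ x) →
    (∀ q, q.Prime → b < q → x.factorization q = m.factorization q) →
    d = PySem.Dict.mk (upTo b m) →
    (factorLoopB spfL fuel (x:Int) d).items = refFacts m := by
  intro fuel
  induction fuel with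
  | zero => intro x b d hfuel; omega
  | succ fuel ih =>
    intro x b d hfuel hx hxm hb1 hbm hsmall hfact hd
    simp only [factorLoopB]
    by_cases hx1 : 1 < (x:Int)
    · rw [if_pos hx1]
      have hx2 : 2 ≤ x := by exact_mod_cast hx1
      have hxlem : x ≤ m := Nat.le_of_dvd (by omega) hxm
      have htn : ((x:Int)).toNat = x := Int.toNat_natCast x
      rw [htn, hspf x hx2 hxlem]
      set p := x.minFac with hpdef
      have hpp : p.Prime := Nat.minFac_prime (by omega)
      have hpdvd : p ∣ x := Nat.minFac_dvd x
      set v := x.factorization p with hv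
      have hv1 : 1 ≤ v := (Nat.Prime.dvd_iff_one_le_factorization hpp (by omega)).mp hpdvd
      have hvlex : v ≤ x := by
        have h1 : v < 2 ^ v := Nat.lt_pow_self (by omega)
        have h2 : (2:Nat) ^ v ≤ p ^ v := Nat.pow_le_pow_left hpp.two_le v
        have h3 : p ^ v ∣ x := Nat.ordProj_dvd x p
        have h4 : p ^ v ≤ x := Nat.le_of_dvd (by omega) h3
        omega
      rw [countDivB_spec hpp x x hx hvlex]
      set x' := x / p ^ v with hx'
      have hbp : b < p := by
        by_contra hle
        exact hsmall p hpp (by omega) hpdvd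
      have hx'pos : 1 ≤ x' := Nat.ordCompl_pos p (by omega)
      have hx'dvd : x' ∣ x := Nat.ordCompl_dvd x p
      have hx'lt : x' < x := by
        have h1 : x' ≤ x / p := by
          apply Nat.div_le_div_left (Nat.le_self_pow (by omega) p) (by omega)
        have h2 : x / p < x := Nat.div_lt_self (by omega) hpp.one_lt
        omega
      have hfresh : ∀ pr ∈ upTo b m, pr.1 ≠ (p:Int) := by
        intro pr hpr
        obtain ⟨q, hq1, hq2, -, -⟩ := upTo_key_lt hpr
        rw [hq1]
        intro hc
        have : q = p := by exact_mod_cast hc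
        omega
      have hpm' : p ∣ m := dvd_trans hpdvd hxm
      have hvm : m.factorization p = v := (hfact p hpp hbp).symm
      have hplem : p ≤ m := Nat.le_of_dvd (by omega) hpm'
      have hd' : d.insert (p:Int) (v:Int) = PySem.Dict.mk (upTo p m) := by
        rw [hd, dict_insert_fresh hfresh]
        congr 1
        have hext : upTo (p-1) m = upTo b m :=
          upTo_extend (show b ≤ p - 1 from by omega) (fun q hq1 hq2 => fun ⟨hqp, hqd⟩ => by
            have hq1' : 1 ≤ m.factorization q :=
              (Nat.Prime.dvd_iff_one_le_factorization hqp (by omega)).mp hqd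
            have hvq : x.factorization q = m.factorization q := hfact q hqp (by omega)
            have hqdx : q ∣ x :=
              (Nat.Prime.dvd_iff_one_le_factorization hqp (by omega)).mpr (by omega)
            have := Nat.minFac_le_of_dvd hqp.two_le hqdx
            omega)
        rw [show p = (p - 1) + 1 from by omega, upTo_succ,
          if_pos ⟨by rw [show p - 1 + 1 = p from by omega]; exact hpp,
                  by rw [show p - 1 + 1 = p from by omega]; exact hpm'⟩]
        rw [show p - 1 + 1 = p from by omega, hvm, hext]
      rw [hd']
      refine ih x' p _ (by omega) hx'pos (dvd_trans hx'dvd hxm) (by omega) hplem ?_ ?_ rfl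
      · intro q hq hql
        rcases Nat.lt_or_ge q p with hlt | hge
        · intro hc
          have hqx : q ∣ x := dvd_trans hc hx'dvd
          have := Nat.minFac_le_of_dvd hq.two_le hqx
          omega
        · have hqp : q = p := by omega
          rw [hqp, hx', hv]
          exact Nat.not_dvd_ordCompl hpp (by omega)
      · intro q hq hge
        have hqnep : q ≠ p := by omega
        rw [hx', hv, Nat.factorization_ordCompl, Finsupp.erase_ne hqnep]
        exact hfact q hq (by omega)
    · rw [if_neg hx1]
      have hxeq : x = 1 := by
        have : (x:Int) ≤ 1 := by omega
        have : x ≤ 1 := by exact_mod_cast this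
        omega
      subst hxeq
      rw [hd]
      show upTo b m = refFacts m
      unfold refFacts
      rw [upTo_extend hbm (fun q hq1 hq2 => fun ⟨hqp, hqd⟩ => by
        have hq1' : 1 ≤ m.factorization q :=
          (Nat.Prime.dvd_iff_one_le_factorization hqp (by omega)).mp hqd
        have hvq : (1:Nat).factorization q = m.factorization q := hfact q hqp (by omega)
        rw [Nat.factorization_one] at hvq
        simp at hvq
        omega)]

lemma portB_eq (bound : Int) :
    init_factorization_py_alt bound = (List.range (bound+1).toNat).map refFacts := by
  have hdef : init_factorization_py_alt bound =
      (((PySem.List.pyRange 2 (bound+1) 1).foldl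
        (fun acc m => acc.modify m.toNat (fun f =>
          factorLoopB ((PySem.List.pyRange 2 (bound+1) 1).foldl (sieveStepB bound)
            ((PySem.List.pyRange 0 (bound+1) 1).map (fun _ => (0:Int)))) (m.toNat + 1) m f))
        ((PySem.List.pyRange 0 (bound+1) 1).map
          (fun _ => (PySem.Dict.empty : PySem.Dict Int Int)))).map PySem.Dict.items) := rfl
  rw [hdef]
  by_cases hb : 2 ≤ bound
  · set spfL := (PySem.List.pyRange 2 (bound+1) 1).foldl (sieveStepB bound)
      ((PySem.List.pyRange 0 (bound+1) 1).map (fun _ => (0:Int))) with hspfL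
    obtain ⟨hsl, hsidx⟩ := sieveB_inv hb bound (by omega) le_rfl
    have hspf : ∀ x : Nat, 2 ≤ x → (x:Int) ≤ bound → spfL.getD x 0 = (x.minFac : Int) := by
      intro x hx2 hxb
      rw [List.getD_eq_getElem?_getD, hsidx x (by omega)]
      show spfAt bound x = _
      unfold spfAt
      have hmfle : x.minFac ≤ x := Nat.minFac_le (by omega)
      rw [if_pos ⟨hx2, by omega⟩]
    have hL0 : (PySem.List.pyRange 0 (bound+1) 1).length = (bound+1).toNat := by
      rw [PySem.List.length_pyRange_one]; omega
    have hMpos : ∀ x ∈ PySem.List.pyRange 2 (bound+1) 1, (0:Int) ≤ x := fun x hx => by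
      have := PySem.List.mem_pyRange_one.mp hx; omega
    apply List.ext_getElem?
    intro j
    rw [List.getElem?_map, List.getElem?_map,
      foldl_modify_getElem? (fun m f => factorLoopB spfL (m.toNat + 1) m f) _
        hMpos (PySem.List.nodup_pyRange_one 2 (bound+1)) _ j]
    by_cases hjn : j < (bound+1).toNat
    · have hbase : ((PySem.List.pyRange 0 (bound+1) 1).map
          (fun _ => (PySem.Dict.empty : PySem.Dict Int Int)))[j]? = some PySem.Dict.empty := by
        rw [List.getElem?_map, List.getElem?_eq_getElem (by omega)]
        rfl
      by_cases hj2 : (j:Int) ∈ PySem.List.pyRange 2 (bound+1) 1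
      · have hj2' : 2 ≤ j := by
          have := PySem.List.mem_pyRange_one.mp hj2
          omega
        have hfl : (factorLoopB spfL ((j:Int).toNat + 1) (j:Int) PySem.Dict.empty).items
            = refFacts j := by
          rw [Int.toNat_natCast]
          exact factorLoopB_spec (by omega) spfL
            (fun x hx2 hxm => hspf x hx2 (by omega)) (j+1) j 1 PySem.Dict.empty
            (by omega) (by omega) dvd_rfl le_rfl (by omega)
            (fun q hq hql => absurd hq.two_le (by omega))
            (fun q _ _ => rfl)
            (by rw [upTo_one]; rfl)
        rw [if_pos hj2, hbase,
          show ((fun (m : Int) f => factorLoopB spfL (m.toNat + 1) m f) (j:Int) <$>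
            some (PySem.Dict.empty : PySem.Dict Int Int)) =
            some (factorLoopB spfL ((j:Int).toNat + 1) (j:Int) PySem.Dict.empty) from rfl,
          List.getElem?_eq_getElem (by rw [List.length_range]; omega), Option.map_some,
          Option.map_some, List.getElem_range, hfl]
      · have hj1 : j ≤ 1 := by
          by_contra hgt
          exact hj2 (PySem.List.mem_pyRange_one.mpr ⟨by omega, by omega⟩)
        rw [if_neg hj2, hbase,
          List.getElem?_eq_getElem (by rw [List.length_range]; omega), Option.map_some,
          Option.map_some, List.getElem_range, refFacts_of_le_one hj1]
        rfl
    · rw [if_neg (by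
          intro hm
          have := PySem.List.mem_pyRange_one.mp hm
          omega),
        List.getElem?_eq_none (by rw [List.length_map, hL0]; omega),
        List.getElem?_eq_none (by rw [List.length_range]; omega)]
      rfl
  · rw [PySem.List.pyRange_one_eq_nil (show bound + 1 ≤ 2 by omega), List.foldl_nil]
    by_cases hb0 : bound + 1 ≤ 0
    · rw [PySem.List.pyRange_one_eq_nil hb0, show (bound+1).toNat = 0 from by omega]
      rfl
    · rw [show bound + 1 = (((bound+1).toNat : Nat) : Int) from by omega,
        PySem.List.pyRange_zero_natCast, List.map_map, List.map_map]
      apply List.map_congr_left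
      intro k hk
      have hkn : k < (bound+1).toNat := List.mem_range.mp hk
      simp only [Function.comp]
      rw [refFacts_of_le_one (by omega)]
      rfl

-- ===== VERDICT (by name: the statement is the Claim_ definition above) =====
theorem init_factorization_py_spec : Claim_equal_init_factorization_py := by
  intro bound _
  unfold Spec_init_factorization_py
  rw [portA_eq, portB_eq]
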